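-- pv_equiv track=rewrite | github.com/EfazAhmed/CodeSignal-Arcade | Intro/52_longestWord.py | solution
-- ===== SOURCE A (Python) =====
-- def solution(text):
--
--     temp = ""
--     for i in range(len(text)):
--         if text[i].isalpha() or text[i] == " ":
--             temp += text[i]
--         else:
--             temp += " "
--
--     li = temp.split(" ")
--
--     max_ = 0
--     word = ""
--
--     for el in li:
--         length = len(el)
--         if length > max_:
--             max_ = length
--             word = el
--
--     return word
-- ===== SOURCE B (Python) =====
-- def solution(text):
--     best = ""
--     cur = ""
--     for c in text:
--         if c.isalpha():
--             cur += c
--         else: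
--             if len(cur) > len(best):
--                 best = cur
--             cur = ""
--     return cur if len(cur) > len(best) else best
-- ===== Notes on version B (the rewrite author's own statement) =====
-- stated objective: faster
-- what changed: Single pass over the characters with a current-word/best-word accumulator, instead of building a normalized copy of the text, splitting it on spaces and scanning the word list in a second loop.
import Mathlib
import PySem

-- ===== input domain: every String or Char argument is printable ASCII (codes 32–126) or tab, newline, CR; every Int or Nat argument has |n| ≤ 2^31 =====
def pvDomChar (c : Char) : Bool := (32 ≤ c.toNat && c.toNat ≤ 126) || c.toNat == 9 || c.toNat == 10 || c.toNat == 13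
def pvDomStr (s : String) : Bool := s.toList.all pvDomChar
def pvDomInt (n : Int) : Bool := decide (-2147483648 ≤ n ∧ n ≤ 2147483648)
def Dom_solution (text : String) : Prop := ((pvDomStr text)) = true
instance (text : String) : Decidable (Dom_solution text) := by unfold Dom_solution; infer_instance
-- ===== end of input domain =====

-- B replaces A's normalize/split/scan pipeline by a single pass with a current-word and best-word accumulator; objective: simpler.


-- ===== PORT A =====
def solution (text : String) : String :=
  let cs := text.toList
  let temp : List Char := (PySem.List.pyRange 0 (PySem.Chars.len cs) 1).foldl
    (fun t i =>
      if PySem.Chars.isalpha (PySem.List.pyGetD cs i ' ') || PySem.List.pyGetD cs i ' ' == ' '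
      then t ++ [PySem.List.pyGetD cs i ' ']
      else t ++ [' ']) []
  let li := PySem.Chars.splitOn temp [' ']
  let r := li.foldl
    (fun (p : Nat × List Char) el => if el.length > p.1 then (el.length, el) else p)
    ((0 : Nat), ([] : List Char))
  String.mk r.2

-- ===== PORT B =====
def solution_alt (text : String) : String :=
  let p := text.toList.foldl
    (fun (p : List Char × List Char) c =>
      if PySem.Chars.isalpha c then (p.1 ++ [c], p.2)
      else (([] : List Char), if p.1.length > p.2.length then p.1 else p.2))
    ([], [])
  String.mk (if p.1.length > p.2.length then p.1 else p.2)

-- ===== PRECONDITION & SPEC =====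
def Spec_solution (text : String) (out : String) : Prop := out = solution_alt text
instance (text : String) (out : String) : Decidable (Spec_solution text out) := by unfold Spec_solution; infer_instance

-- ===== CLAIM (what is proved, stated in full; the proofs are below) =====
def Claim_equal_solution : Prop := ∀ (text : String), Dom_solution text → Spec_solution text (solution text)

-- ===== LEMMAS AND PROOFS =====

/-- normalization A performs char by char -/
def pvNorm (c : Char) : Char :=
  if PySem.Chars.isalpha c || c == ' ' then c else ' '

/-- simple structural recursion computing `split(" ")` (keeping empty pieces) -/
def pvSplit : List Char → List (List Char)
  | [] => [[]]
  | c :: l => if c = ' ' then [] :: pvSplit l else (pvSplit l).modifyHead (c :: ·)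

theorem pvSplit_ne_nil (l : List Char) : pvSplit l ≠ [] := by
  induction l with
  | nil => simp [pvSplit]
  | cons c l ih =>
    simp only [pvSplit]
    split
    · simp
    · cases h : pvSplit l with
      | nil => exact absurd h ih
      | cons a r => simp [List.modifyHead]

theorem go_eq_pvSplit (fuel : Nat) (l cur : List Char) (acc : List (List Char))
    (h : l.length < fuel) :
    PySem.Chars.splitOn.go [' '] fuel l cur acc
      = acc.reverse ++ (pvSplit l).modifyHead (cur.reverse ++ ·) := by
  induction fuel generalizing l cur acc with
  | zero => omega
  | succ fuel ih =>
    cases l with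
    | nil => simp [PySem.Chars.splitOn.go, pvSplit, List.modifyHead]
    | cons c rest =>
      simp only [PySem.Chars.splitOn.go]
      by_cases hc : c = ' '
      · subst hc
        have : List.isPrefixOf [' '] (' ' :: rest) = true := by
          simp [List.isPrefixOf]
        rw [if_pos this, ih _ _ _ (by simpa using Nat.lt_of_succ_lt_succ h)]
        simp only [pvSplit, if_pos rfl, List.modifyHead, List.reverse_cons,
          List.append_assoc, List.reverse_nil]
        rcases h2 : pvSplit rest with _ | ⟨a, r⟩
        · exact absurd h2 (pvSplit_ne_nil rest)
        · simp [h2]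
      · have : List.isPrefixOf [' '] (c :: rest) = false := by
          simp [List.isPrefixOf, Ne.symm hc]
        rw [if_neg (by simp [this]), ih _ _ _ (by simpa using Nat.lt_of_succ_lt_succ h)]
        simp only [pvSplit, if_neg hc]
        cases pvSplit rest <;> simp [List.modifyHead]

theorem splitOn_eq_pvSplit (l : List Char) :
    PySem.Chars.splitOn l [' '] = pvSplit l := by
  rw [PySem.Chars.splitOn, go_eq_pvSplit _ _ _ _ (by omega)]
  cases h : pvSplit l <;> simp [List.modifyHead]

theorem modifyHead_nil_append (ws : List (List Char)) :
    ws.modifyHead (fun w => ([] : List Char) ++ w) = ws := by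
  cases ws <;> simp [List.modifyHead]

/-- the normalization loop builds `map pvNorm` -/
theorem foldl_norm (l : List Char) (init : List Char) :
    l.foldl (fun t c => if PySem.Chars.isalpha c || c == ' ' then t ++ [c] else t ++ [' ']) init
      = init ++ l.map pvNorm := by
  induction l generalizing init with
  | nil => simp
  | cons c l ih =>
    simp only [List.foldl_cons, List.map_cons, ih, pvNorm]
    split <;> simp

theorem isalpha_ne_space {c : Char} (h : PySem.Chars.isalpha c = true) : c ≠ ' ' := by
  intro hc; subst hc; simp [PySem.Chars.isalpha, PySem.Chars.isupper, PySem.Chars.islower] at h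

/-- main invariant: A's scan over the split of the normalized remainder, with the
    in-progress word `cur` glued onto the first piece, equals B's single pass. -/
theorem main_inv (l : List Char) (cur w : List Char) :
    (((pvSplit (l.map pvNorm)).modifyHead (cur ++ ·)).foldl
        (fun (p : Nat × List Char) el => if el.length > p.1 then (el.length, el) else p)
        (w.length, w)).2
      = (let p := l.foldl
            (fun (p : List Char × List Char) c =>
              if PySem.Chars.isalpha c then (p.1 ++ [c], p.2)
              else (([] : List Char), if p.1.length > p.2.length then p.1 else p.2))
            (cur, w)
         if p.1.length > p.2.length then p.1 else p.2) := by
  induction l generalizing cur w with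
  | nil =>
    simp only [List.map_nil, pvSplit, List.modifyHead, List.foldl_cons, List.foldl_nil]
    split <;> simp_all
  | cons c l ih =>
    by_cases ha : PySem.Chars.isalpha c = true
    · have hnorm : pvNorm c = c := by simp [pvNorm, ha]
      have hc : c ≠ ' ' := isalpha_ne_space ha
      simp only [List.map_cons, hnorm, pvSplit, if_neg hc, List.foldl_cons, ha, if_pos]
      rw [List.modifyHead_modifyHead]
      have := ih (cur ++ [c]) w
      simpa [Function.comp] using this
    · have hnorm : pvNorm c = ' ' := by
        simp only [pvNorm]
        by_cases hc : c = ' ' <;> simp [hc, ha]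
      have hs : pvSplit (List.map pvNorm (c :: l)) = [] :: pvSplit (List.map pvNorm l) := by
        rw [List.map_cons, hnorm]; simp [pvSplit]
      rw [hs]
      simp only [List.modifyHead, List.append_nil, List.foldl_cons, if_neg ha]
      have hstate : (if cur.length > w.length then (cur.length, cur) else (w.length, w))
          = ((if cur.length > w.length then cur else w).length,
             (if cur.length > w.length then cur else w)) := by
        split <;> rfl
      rw [hstate]
      have := ih [] (if cur.length > w.length then cur else w)
      rw [modifyHead_nil_append] at this
      simpa using this

-- ===== VERDICT (by name: the statement is the Claim_ definition above) =====
theorem solution_spec : Claim_equal_solution := by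
  intro text _
  unfold Spec_solution solution solution_alt
  simp only [PySem.Chars.len_eq]
  rw [PySem.List.foldl_pyRange_zero_pyGetD' text.toList ' '
        (fun t c => if PySem.Chars.isalpha c || c == ' ' then t ++ [c] else t ++ [' ']) []]
  rw [foldl_norm, List.nil_append, splitOn_eq_pvSplit]
  have := main_inv text.toList [] []
  rw [modifyHead_nil_append] at this
  simpa using congrArg String.mk this
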